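-- pv_equiv track=rewrite | github.com/LogicZMaksimka/My-projects | MIPT projects/Python projects/Text generator/text_gen.py | fix_punctuation_and_grammar
-- ===== SOURCE A (Python) =====
-- def fix_punctuation_and_grammar(text_str):
--     # стираем начало теста до первой буквы
--     # и делаем первую букву заглавной
--     incorrect_symbols_in_beginning_count = 0
--     for sym in text_str:
--         if not sym.isalpha():
--             incorrect_symbols_in_beginning_count += 1
--         else:
--             break
--
--     correct_beginning_str = text_str[incorrect_symbols_in_beginning_count].upper()
--     correct_beginning_str += text_str[incorrect_symbols_in_beginning_count + 1:]
--
--     # удаляем символы которые не могут встречаться друг за другом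
--     not_paired_symbols = '.?!,:-'
--     previous_sym = '*'
--     correct_punctuation_str = ''
--     for sym in correct_beginning_str:
--         if previous_sym not in not_paired_symbols or sym not in not_paired_symbols:
--             correct_punctuation_str += sym
--         previous_sym = sym
--
--     # делаем заглавными буквы стоящие в начале предложения
--     sentence_end_symbols = '.?!'
--     correct_grammar_str = ''
--     for counter, sym in enumerate(correct_punctuation_str):
--         if counter >= 2 and sym.isalpha() and correct_punctuation_str[counter - 2] in sentence_end_symbols:
--             correct_grammar_str += sym.upper()
--         else:
--             correct_grammar_str += sym
--     return correct_grammar_str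
-- ===== SOURCE B (Python) =====
-- def fix_punctuation_and_grammar(text_str):
--     # find the first letter; raises IndexError (like the original) if there is none
--     i = 0
--     while i < len(text_str) and not text_str[i].isalpha():
--         i += 1
--     stripped = text_str[i].upper() + text_str[i + 1:]
--
--     # one fused pass: drop a punctuation char that follows another punctuation
--     # char, and capitalize a letter whose kept predecessor-but-one ends a sentence
--     not_paired = '.?!,:-'
--     out = []
--     prev = '*'
--     for ch in stripped:
--         if not (prev in not_paired and ch in not_paired):
--             if len(out) >= 2 and ch.isalpha() and out[-2] in '.?!':
--                 out.append(ch.upper())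
--             else:
--                 out.append(ch)
--         prev = ch
--     return ''.join(out)
-- ===== Notes on version B (the rewrite author's own statement) =====
-- stated objective: alternative
-- what changed: B fuses A's two separate passes (pair-of-punctuation removal, then sentence-start capitalization indexed into the deduped string) into one loop that appends to a result list (joined once) and capitalizes by looking two characters back into the output built so far.
import Mathlib
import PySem

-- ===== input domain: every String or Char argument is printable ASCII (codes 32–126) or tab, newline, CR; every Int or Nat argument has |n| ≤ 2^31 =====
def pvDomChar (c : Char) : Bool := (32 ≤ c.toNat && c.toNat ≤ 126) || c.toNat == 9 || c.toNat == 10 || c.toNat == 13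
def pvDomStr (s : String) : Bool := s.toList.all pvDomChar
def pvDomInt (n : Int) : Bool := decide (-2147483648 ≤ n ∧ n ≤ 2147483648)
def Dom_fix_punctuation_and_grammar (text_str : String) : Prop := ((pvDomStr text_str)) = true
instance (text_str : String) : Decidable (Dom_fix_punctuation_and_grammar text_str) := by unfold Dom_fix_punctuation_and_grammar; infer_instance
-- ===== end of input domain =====

-- B fuses A's two cleanup passes into one output-building loop (same values; no speed claim).


-- shared literal constants: not_paired_symbols = '.?!,:-' and sentence_end_symbols = '.?!'
def pvNotPaired : List Char := ['.', '?', '!', ',', ':', '-']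
def pvSentEnd : List Char := ['.', '?', '!']

-- ===== PORT A =====
-- first for-loop with break: count the non-alpha prefix
def pvACount : List Char → Nat
  | [] => 0
  | c :: cs => if ¬ PySem.Chars.isalpha c then pvACount cs + 1 else 0

-- second for-loop: drop a not_paired symbol following another one (prev updated every step)
def pvAPass2 (prev : Char) (acc : List Char) : List Char → List Char
  | [] => acc
  | c :: cs => pvAPass2 c (if prev ∉ pvNotPaired ∨ c ∉ pvNotPaired then acc ++ [c] else acc) cs

-- third for-loop over enumerate: capitalize after a sentence end two positions back in t
def pvAPass3 (t : List Char) (k : Nat) : List Char → List Char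
  | [] => []
  | c :: cs =>
    (if 2 ≤ k ∧ PySem.Chars.isalpha c = true ∧ t.getD (k - 2) '*' ∈ pvSentEnd
     then PySem.Chars.upperChar c else c) :: pvAPass3 t (k + 1) cs

def fix_punctuation_and_grammar (text_str : String) : String :=
  let l := text_str.toList
  let cnt := pvACount l
  -- text_str[cnt].upper() + text_str[cnt+1:]; when no letter exists Python raises IndexError
  -- (those inputs are outside Pre_), here that degenerate branch gives []
  let cb : List Char :=
    match l.drop cnt with
    | c :: rest => PySem.Chars.upperChar c :: rest
    | [] => []
  let cp := pvAPass2 '*' [] cb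
  String.mk (pvAPass3 cp 0 cp)

-- ===== PORT B =====
-- while loop: index of the first alpha character (list length if none)
def pvBFind : List Char → Nat
  | [] => 0
  | c :: cs => if PySem.Chars.isalpha c then 0 else pvBFind cs + 1

-- the single fused pass: keep/drop and, for kept chars, capitalize via out[-2]
def pvBLoop (prev : Char) (out : List Char) : List Char → List Char
  | [] => out
  | c :: cs =>
    let out' :=
      if ¬ (prev ∈ pvNotPaired ∧ c ∈ pvNotPaired) then
        if 2 ≤ out.length ∧ PySem.Chars.isalpha c = true ∧
            (PySem.List.pyGet? out (-2)).getD '*' ∈ pvSentEnd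
        then out ++ [PySem.Chars.upperChar c]
        else out ++ [c]
      else out
    pvBLoop c out' cs

def fix_punctuation_and_grammar_alt (text_str : String) : String :=
  let l := text_str.toList
  let i := pvBFind l
  -- text_str[i].upper() + text_str[i+1:]; raises IndexError like A when no letter exists
  let stripped : List Char :=
    match l.drop i with
    | c :: rest => PySem.Chars.upperChar c :: rest
    | [] => []
  String.mk (pvBLoop '*' [] stripped)

-- ===== PRECONDITION & SPEC =====
-- Pre_ excludes exactly the inputs with no alphabetic character, on which both Pythons
-- raise IndexError when indexing the first letter.
def Pre_fix_punctuation_and_grammar (text_str : String) : Prop :=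
  text_str.toList.any PySem.Chars.isalpha = true
instance (text_str : String) : Decidable (Pre_fix_punctuation_and_grammar text_str) := by
  unfold Pre_fix_punctuation_and_grammar; infer_instance

def pvWitness_fix_punctuation_and_grammar : String := "hello!! world. yes"

def Spec_fix_punctuation_and_grammar (text_str : String) (out : String) : Prop := out = fix_punctuation_and_grammar_alt text_str
instance (text_str : String) (out : String) : Decidable (Spec_fix_punctuation_and_grammar text_str out) := by unfold Spec_fix_punctuation_and_grammar; infer_instance

-- ===== CLAIM (what is proved, stated in full; the proofs are below) =====
def Claim_equal_fix_punctuation_and_grammar : Prop := ∀ (text_str : String), Dom_fix_punctuation_and_grammar text_str → Pre_fix_punctuation_and_grammar text_str → Spec_fix_punctuation_and_grammar text_str (fix_punctuation_and_grammar text_str)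

-- ===== LEMMAS AND PROOFS =====

theorem pvCount_eq_find (l : List Char) : pvACount l = pvBFind l := by
  induction l with
  | nil => rfl
  | cons c cs ih =>
    by_cases h : PySem.Chars.isalpha c = true <;> simp [pvACount, pvBFind, h, ih]

theorem pvAPass2_acc (cs : List Char) (p : Char) (acc : List Char) :
    pvAPass2 p acc cs = acc ++ pvAPass2 p [] cs := by
  induction cs generalizing p acc with
  | nil => simp [pvAPass2]
  | cons c cs ih =>
    by_cases h : p ∉ pvNotPaired ∨ c ∉ pvNotPaired
    · rw [pvAPass2, if_pos h, pvAPass2, if_pos h, ih c (acc ++ [c]), ih c ([] ++ [c])]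
      simp
    · rw [pvAPass2, if_neg h, pvAPass2, if_neg h, ih c acc]

theorem pvAPass2_keep (cs : List Char) (p c : Char) (h : p ∉ pvNotPaired ∨ c ∉ pvNotPaired) :
    pvAPass2 p [] (c :: cs) = c :: pvAPass2 c [] cs := by
  rw [pvAPass2, if_pos h, pvAPass2_acc]
  simp

theorem pvAPass2_drop (cs : List Char) (p c : Char) (h : ¬ (p ∉ pvNotPaired ∨ c ∉ pvNotPaired)) :
    pvAPass2 p [] (c :: cs) = pvAPass2 c [] cs := by
  rw [pvAPass2, if_neg h]

theorem pv_alpha_not_SE (c : Char) (h : PySem.Chars.isalpha c = true) : c ∉ pvSentEnd := by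
  intro hm
  fin_cases hm <;> exact absurd h (by decide)

theorem pv_upper_not_SE (c : Char) (h : PySem.Chars.isalpha c = true) :
    PySem.Chars.upperChar c ∉ pvSentEnd := by
  unfold PySem.Chars.upperChar
  by_cases hl : PySem.Chars.islower c = true
  · simp only [hl, if_pos]
    have h1 : 97 ≤ c.toNat ∧ c.toNat ≤ 122 := by
      simp [PySem.Chars.islower, Char.le_def] at hl
      exact ⟨hl.1, hl.2⟩
    have hv : (c.toNat - 32).isValidChar := Or.inl (by omega)
    have htn : (Char.ofNat (c.toNat - 32)).toNat = c.toNat - 32 := by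
      rw [Char.toNat_ofNat, if_pos hv]
    have d1 : ('.' : Char).toNat = 46 := by decide
    have d2 : ('?' : Char).toNat = 63 := by decide
    have d3 : ('!' : Char).toNat = 33 := by decide
    intro hm
    simp only [pvSentEnd, List.mem_cons, List.not_mem_nil, or_false] at hm
    rcases hm with hm | hm | hm <;>
      (replace hm := congrArg Char.toNat hm
       rw [htn] at hm
       simp only [d1, d2, d3] at hm
       omega)
  · simp only [hl, if_neg, Bool.false_eq_true, not_false_eq_true]
    exact pv_alpha_not_SE c h

-- extending the modified prefix by one kept char preserves the membership correspondence
theorem pvExt (acc T : List Char) (c mc : Char) (hlen : T.length = acc.length)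
    (hmem : ∀ j : Nat, (acc.getD j '*' ∈ pvSentEnd) ↔ (T.getD j '*' ∈ pvSentEnd))
    (hc : (mc ∈ pvSentEnd) ↔ (c ∈ pvSentEnd)) :
    ∀ j : Nat, ((acc ++ [mc]).getD j '*' ∈ pvSentEnd) ↔ ((T ++ [c]).getD j '*' ∈ pvSentEnd) := by
  intro j
  by_cases hj : j < acc.length
  · rw [List.getD_append _ _ _ _ hj, List.getD_append _ _ _ _ (by omega)]
    exact hmem j
  · by_cases hj2 : j = acc.length
    · subst hj2
      have e2 : acc.length - T.length = 0 := by omega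
      rw [List.getD_append_right _ _ _ _ (by omega), List.getD_append_right _ _ _ _ (by omega),
          Nat.sub_self, e2]
      simpa using hc
    · rw [List.getD_eq_default _ _ (by simp; omega), List.getD_eq_default _ _ (by simp; omega)]

-- main invariant: the fused B loop equals "pass2 then pass3", with acc the modified
-- prefix corresponding to the (unmodified) pass2-output prefix T
theorem pvMain (cs : List Char) (p : Char) (acc T : List Char)
    (hlen : T.length = acc.length)
    (hmem : ∀ j : Nat, (acc.getD j '*' ∈ pvSentEnd) ↔ (T.getD j '*' ∈ pvSentEnd)) :
    pvBLoop p acc cs = acc ++ pvAPass3 (T ++ pvAPass2 p [] cs) T.length (pvAPass2 p [] cs) := by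
  induction cs generalizing p acc T with
  | nil => simp [pvBLoop, pvAPass2, pvAPass3]
  | cons c cs ih =>
    by_cases hkeep : p ∉ pvNotPaired ∨ c ∉ pvNotPaired
    · -- kept character
      have hkeep' : ¬ (p ∈ pvNotPaired ∧ c ∈ pvNotPaired) := by tauto
      rw [pvAPass2_keep cs p c hkeep]
      -- agreement of the two capitalization conditions
      have hcond : (2 ≤ acc.length ∧ PySem.Chars.isalpha c = true ∧
            (PySem.List.pyGet? acc (-2)).getD '*' ∈ pvSentEnd)
          ↔ (2 ≤ T.length ∧ PySem.Chars.isalpha c = true ∧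
            (T ++ c :: pvAPass2 c [] cs).getD (T.length - 2) '*' ∈ pvSentEnd) := by
        by_cases h2 : 2 ≤ acc.length
        · have hget : PySem.List.pyGet? acc (-2) = acc[acc.length - 2]? :=
            PySem.List.pyGet?_neg_ofNat acc 2 (by omega) (by omega)
          have hsome : acc[acc.length - 2]? = some acc[acc.length - 2] :=
            List.getElem?_eq_getElem (by omega)
          have hacc : (PySem.List.pyGet? acc (-2)).getD '*' = acc.getD (acc.length - 2) '*' := by
            rw [hget]
            simp [List.getD_eq_getElem?_getD]
          rw [hacc, List.getD_append _ _ _ _ (by omega), hlen]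
          have hthis := hmem (acc.length - 2)
          constructor
          · rintro ⟨x, y, z⟩; exact ⟨x, y, hthis.mp z⟩
          · rintro ⟨x, y, z⟩; exact ⟨x, y, hthis.mpr z⟩
        · constructor
          · rintro ⟨h, _⟩; omega
          · rintro ⟨h, _⟩; omega
      by_cases hc : (2 ≤ acc.length ∧ PySem.Chars.isalpha c = true ∧
            (PySem.List.pyGet? acc (-2)).getD '*' ∈ pvSentEnd)
      · have hcA := hcond.mp hc
        simp only [pvBLoop, if_pos hkeep', if_pos hc]
        rw [pvAPass3, if_pos hcA,
            ih c (acc ++ [PySem.Chars.upperChar c]) (T ++ [c]) (by simp [hlen])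
              (pvExt acc T c _ hlen hmem
                (iff_of_false (pv_upper_not_SE c hc.2.1) (pv_alpha_not_SE c hc.2.1)))]
        simp
      · have hcA : ¬ (2 ≤ T.length ∧ PySem.Chars.isalpha c = true ∧
            (T ++ c :: pvAPass2 c [] cs).getD (T.length - 2) '*' ∈ pvSentEnd) :=
          fun hh => hc (hcond.mpr hh)
        simp only [pvBLoop, if_pos hkeep', if_neg hc]
        rw [pvAPass3, if_neg hcA,
            ih c (acc ++ [c]) (T ++ [c]) (by simp [hlen])
              (pvExt acc T c c hlen hmem Iff.rfl)]
        simp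
    · -- dropped character: both loops skip it, prev becomes c
      have hk : ¬ ¬ (p ∈ pvNotPaired ∧ c ∈ pvNotPaired) := by tauto
      rw [pvAPass2_drop cs p c hkeep]
      simp only [pvBLoop, if_neg hk]
      exact ih c acc T hlen hmem

-- ===== VERDICT (by name: the statement is the Claim_ definition above) =====
theorem fix_punctuation_and_grammar_spec : Claim_equal_fix_punctuation_and_grammar := by
  intro text_str _ _
  unfold Spec_fix_punctuation_and_grammar
  simp only [fix_punctuation_and_grammar, fix_punctuation_and_grammar_alt]
  rw [pvCount_eq_find]
  have h := pvMain
    (match text_str.toList.drop (pvBFind text_str.toList) with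
      | c :: rest => PySem.Chars.upperChar c :: rest
      | [] => []) '*' [] [] rfl (fun _ => Iff.rfl)
  simp only [List.nil_append, List.length_nil] at h
  rw [h]
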